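-- pv_equiv track=rewrite | github.com/jjmark15/happynum_py | dist_happy_num_range_calc.py | get_dist_happy
-- ===== SOURCE A (Python) =====
-- def square_sum(n):
--     ss = 0
--     for digit in str(n):
--         ss += int(digit)**2
--     return ss
--
-- def ishappy(n):
--     ss = square_sum(n)
--     while True:
--         ss = square_sum(ss)
--         # if ss == 89 or ss == 0: # either of these indicates not happy
--         if ss in [89, 145, 42, 37, 58, 20, 4, 16]: # this turns out to be faster
--             return False
--             break
--         elif ss == 1: # therefore happy
--             return True
--             break
--
-- def get_dist_happy(r):
--     happy_numbers = []
--     count = 0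
--
--     # cycle through range
--     for i in range(1, r + 1):
--         # sort number digit order
--         i = int(''.join(sorted([d for d in str(i)])))
--         if i not in happy_numbers: # check is distinct
--             if ishappy(i):
--                 happy_numbers.append(i)
--                 count += 1
--     return count, happy_numbers
-- ===== SOURCE B (Python) =====
-- def square_sum(n):
--     ss = 0
--     for digit in str(n):
--         ss += int(digit) ** 2
--     return ss
--
--
-- def ishappy(n):
--     # canonical cycle detection: remember every value seen in the
--     # sum-of-squares iteration; happy iff we reach 1 before revisiting.
--     seen = set()
--     while n != 1:
--         if n in seen:
--             return False
--         seen.add(n)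
--         n = square_sum(n)
--     return True
--
--
-- def get_dist_happy(r):
--     happy_numbers = []
--     for i in range(1, r + 1):
--         i = int(''.join(sorted(str(i))))
--         if i not in happy_numbers and ishappy(i):
--             happy_numbers.append(i)
--     return len(happy_numbers), happy_numbers
-- ===== Notes on version B (the rewrite author's own statement) =====
-- stated objective: idiomatic
-- what changed: ishappy now detects unhappiness by the canonical visited-set cycle detection (loop until 1 or a repeated value) instead of probing a hardcoded list of the terminal cycle's members, the redundant running counter is dropped in favour of len(happy_numbers), and sorted(str(i)) replaces the list-comprehension-plus-sort.
import Mathlib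
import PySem

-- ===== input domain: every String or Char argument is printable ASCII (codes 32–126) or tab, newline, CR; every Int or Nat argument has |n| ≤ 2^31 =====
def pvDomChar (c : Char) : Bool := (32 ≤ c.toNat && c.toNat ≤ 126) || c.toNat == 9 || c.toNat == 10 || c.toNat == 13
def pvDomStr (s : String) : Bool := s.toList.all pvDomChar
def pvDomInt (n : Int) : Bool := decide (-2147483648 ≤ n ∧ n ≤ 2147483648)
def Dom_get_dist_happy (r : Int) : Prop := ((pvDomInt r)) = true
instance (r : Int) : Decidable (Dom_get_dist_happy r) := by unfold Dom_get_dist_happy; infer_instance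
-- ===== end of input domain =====

-- B replaces A's hardcoded unhappy-cycle membership test with canonical visited-set cycle
-- detection, drops the redundant counter (the count is always the list length) and sorts
-- str(i) directly; same return value (count, happy_numbers).

-- ===== PORT A =====

-- shared helper of both Pythons: int(s) hand-ported as the positional value of the digits;
-- exact whenever s is a nonempty string of ASCII digits '0'..'9' — the only argument that
-- occurs here (s = ''.join(sorted(str(i))) with i ≥ 1).
def pvParseDigits (cs : List Char) : Int :=
  cs.foldl (fun acc c => acc * 10 + ((c.toNat : Int) - 48)) 0

-- square_sum: `for digit in str(n)` iterates the characters of str(n), i.e. PySem.Int.toChars n;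
-- int(digit) is PySem.Int.ofChars? [digit] (Python raises on a non-digit char; that branch is
-- unreachable from get_dist_happy, whose arguments are ≥ 0, and is given the default 0).
def square_sum (n : Int) : Int :=
  (PySem.Int.toChars n).foldl
    (fun ss digit => ss + ((PySem.Int.ofChars? [digit]).getD 0) ^ 2) 0

-- ishappy's `while True` loop, with fuel as a totality guard (the loop always terminates on
-- the values reached from get_dist_happy; the fuel-out branch returns false, unreached there).
def ishappyLoopA : Nat → Int → Bool
  | 0, _ => false
  | f + 1, ss0 =>
    let ss := square_sum ss0
    if ss ∈ ([89, 145, 42, 37, 58, 20, 4, 16] : List Int) then false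
    else if ss = 1 then true
    else ishappyLoopA f ss

def ishappy (n : Int) : Bool := ishappyLoopA 1000 (square_sum n)

-- shared helper of both Pythons: i = int(''.join(sorted([d for d in str(i)]))) in A and
-- i = int(''.join(sorted(str(i)))) in B compute the same value (the listcomp is exactly the
-- char list of str(i)); sorting the 1-char strings orders them exactly like their characters.
def pvSortedNum (i : Int) : Int :=
  pvParseDigits (PySem.List.sorted (PySem.Int.toChars i) (fun d => d) false)

def stepA (st : List Int × Int) (i : Int) : List Int × Int :=
  let j := pvSortedNum i
  if j ∉ st.1 then
    if ishappy j then (st.1 ++ [j], st.2 + 1) else st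
  else st

def get_dist_happy (r : Int) : Int × List Int :=
  let st := (PySem.List.pyRange 1 (r + 1) 1).foldl stepA (([] : List Int), (0 : Int))
  (st.2, st.1)

-- ===== PORT B =====

-- the visited-set loop of B's ishappy (fuel = totality guard, as above)
def ishappyLoopB : Nat → PySem.Set Int → Int → Bool
  | 0, _, _ => false
  | f + 1, seen, n =>
    if n = 1 then true
    else if PySem.Set.contains seen n then false
    else ishappyLoopB f (PySem.Set.add seen n) (square_sum n)

def ishappy_alt (n : Int) : Bool := ishappyLoopB 1000 PySem.Set.empty n

def stepB (happy : List Int) (i : Int) : List Int :=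
  let j := pvSortedNum i
  if j ∉ happy ∧ ishappy_alt j then happy ++ [j] else happy

def get_dist_happy_alt (r : Int) : Int × List Int :=
  let happy := (PySem.List.pyRange 1 (r + 1) 1).foldl stepB ([] : List Int)
  (PySem.List.len happy, happy)

-- ===== PRECONDITION & SPEC =====
def Spec_get_dist_happy (r : Int) (out : Int × List Int) : Prop := out = get_dist_happy_alt r
instance (r : Int) (out : Int × List Int) : Decidable (Spec_get_dist_happy r out) := by unfold Spec_get_dist_happy; infer_instance

-- ===== CLAIM (what is proved, stated in full; the proofs are below) =====
def Claim_equal_get_dist_happy : Prop := ∀ (r : Int), Dom_get_dist_happy r → Spec_get_dist_happy r (get_dist_happy r)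

-- ===== LEMMAS AND PROOFS =====

-- A's loop body with its membership/1 test applied to the argument (one unfolding of
-- ishappyLoopA); used to relate the two loops after peeling one step.
def pvCheckA (ss : Int) : Bool :=
  if ss ∈ ([89, 145, 42, 37, 58, 20, 4, 16] : List Int) then false
  else if ss = 1 then true
  else ishappyLoopA 999 ss

-- characters of str(n) for n ≥ 0 are decimal digits
lemma pv_digitChar_isDigit : ∀ k : Nat, k < 10 → (Nat.digitChar k).isDigit = true := by decide

lemma pv_toDigitsCore_digits :
    ∀ (f n : Nat) (l : List Char), (∀ c ∈ l, c.isDigit = true) →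
      ∀ c ∈ Nat.toDigitsCore 10 f n l, c.isDigit = true := by
  intro f
  induction f with
  | zero => intro n l hl; simpa [Nat.toDigitsCore] using hl
  | succ f ih =>
    intro n l hl c hc
    rw [Nat.toDigitsCore] at hc
    have hd : (Nat.digitChar (n % 10)).isDigit = true :=
      pv_digitChar_isDigit _ (Nat.mod_lt _ (by norm_num))
    by_cases h : n / 10 = 0
    · simp only [h] at hc
      rcases List.mem_cons.mp hc with h1 | h2
      · exact h1 ▸ hd
      · exact hl _ h2
    · simp only [h] at hc
      refine ih _ _ ?_ c hc
      intro x hx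
      rcases List.mem_cons.mp hx with h1 | h2
      · exact h1 ▸ hd
      · exact hl _ h2

lemma pv_toChars_digits (i : Int) (h : 0 ≤ i) :
    ∀ c ∈ PySem.Int.toChars i, c.isDigit = true := by
  unfold PySem.Int.toChars
  rw [if_neg (by omega)]
  exact pv_toDigitsCore_digits _ _ _ (by simp)

lemma pv_toChars_len (i : Int) (e : Nat) (he : 0 < e) (h0 : 0 ≤ i)
    (h : i < (10 : Int) ^ e) : (PySem.Int.toChars i).length ≤ e := by
  unfold PySem.Int.toChars
  rw [if_neg (by omega)]
  apply Nat.toDigits_length 10 i.toNat e he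
  have : (i.toNat : Int) < ((10 ^ e : Nat) : Int) := by
    rw [Int.toNat_of_nonneg h0]; push_cast; exact h
  exact_mod_cast this

lemma pv_isDigit_bounds (c : Char) (h : c.isDigit = true) :
    48 ≤ c.toNat ∧ c.toNat ≤ 57 := by
  simp [Char.isDigit] at h
  exact ⟨h.1, h.2⟩

lemma pv_char_eq (c d : Char) (h : c.toNat = d.toNat) : c = d :=
  Char.ext (UInt32.toNat_inj.mp h)

-- int of a single digit character is its value, a digit 0..9
lemma pv_ofChars_digit (c : Char) (h : c.isDigit = true) :
    ∃ v : Nat, PySem.Int.ofChars? [c] = some (v : Int) ∧ v ≤ 9 := by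
  obtain ⟨h1, h2⟩ := pv_isDigit_bounds c h
  interval_cases hc : c.toNat
  · exact ⟨0, by rw [pv_char_eq c '0' (by rw [hc]; rfl)]; decide, by omega⟩
  · exact ⟨1, by rw [pv_char_eq c '1' (by rw [hc]; rfl)]; decide, by omega⟩
  · exact ⟨2, by rw [pv_char_eq c '2' (by rw [hc]; rfl)]; decide, by omega⟩
  · exact ⟨3, by rw [pv_char_eq c '3' (by rw [hc]; rfl)]; decide, by omega⟩
  · exact ⟨4, by rw [pv_char_eq c '4' (by rw [hc]; rfl)]; decide, by omega⟩
  · exact ⟨5, by rw [pv_char_eq c '5' (by rw [hc]; rfl)]; decide, by omega⟩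
  · exact ⟨6, by rw [pv_char_eq c '6' (by rw [hc]; rfl)]; decide, by omega⟩
  · exact ⟨7, by rw [pv_char_eq c '7' (by rw [hc]; rfl)]; decide, by omega⟩
  · exact ⟨8, by rw [pv_char_eq c '8' (by rw [hc]; rfl)]; decide, by omega⟩
  · exact ⟨9, by rw [pv_char_eq c '9' (by rw [hc]; rfl)]; decide, by omega⟩

-- bounds for pvParseDigits
lemma pv_parse_aux (cs : List Char) (h : ∀ c ∈ cs, c.isDigit = true) :
    ∀ acc : Int, 0 ≤ acc →
      0 ≤ cs.foldl (fun acc c => acc * 10 + ((c.toNat : Int) - 48)) acc ∧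
      cs.foldl (fun acc c => acc * 10 + ((c.toNat : Int) - 48)) acc < (acc + 1) * 10 ^ cs.length := by
  induction cs with
  | nil => intro acc ha; simp; omega
  | cons c rest ih =>
    intro acc ha
    obtain ⟨hb1, hb2⟩ := pv_isDigit_bounds c (h c (by simp))
    have hrec := ih (fun x hx => h x (by simp [hx])) (acc * 10 + ((c.toNat : Int) - 48)) (by omega)
    simp only [List.foldl_cons, List.length_cons]
    refine ⟨hrec.1, lt_of_lt_of_le hrec.2 ?_⟩
    have hp : (0:Int) < 10 ^ rest.length := by positivity
    have hstep : acc * 10 + ((c.toNat : Int) - 48) + 1 ≤ (acc + 1) * 10 := by omega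
    calc (acc * 10 + ((c.toNat : Int) - 48) + 1) * 10 ^ rest.length
        ≤ ((acc + 1) * 10) * 10 ^ rest.length := mul_le_mul_of_nonneg_right hstep (by positivity)
      _ = (acc + 1) * 10 ^ (rest.length + 1) := by ring

lemma pv_parseDigits_nonneg (cs : List Char) (h : ∀ c ∈ cs, c.isDigit = true) :
    0 ≤ pvParseDigits cs := (pv_parse_aux cs h 0 le_rfl).1

lemma pv_parseDigits_lt (cs : List Char) (h : ∀ c ∈ cs, c.isDigit = true) :
    pvParseDigits cs < (10 : Int) ^ cs.length := by
  have := (pv_parse_aux cs h 0 le_rfl).2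
  simpa [pvParseDigits] using this

-- bounds for square_sum
lemma pv_sq_aux (cs : List Char) :
    ∀ ss : Int, ss ≤ cs.foldl (fun ss d => ss + ((PySem.Int.ofChars? [d]).getD 0) ^ 2) ss ∧
      ((∀ c ∈ cs, c.isDigit = true) →
        cs.foldl (fun ss d => ss + ((PySem.Int.ofChars? [d]).getD 0) ^ 2) ss ≤ ss + 81 * cs.length) := by
  induction cs with
  | nil => intro ss; simp
  | cons c rest ih =>
    intro ss
    simp only [List.foldl_cons, List.length_cons]
    constructor
    · calc ss ≤ ss + ((PySem.Int.ofChars? [c]).getD 0) ^ 2 := by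
            linarith [sq_nonneg ((PySem.Int.ofChars? [c]).getD 0)]
        _ ≤ _ := (ih _).1
    · intro h
      obtain ⟨v, hv, hv9⟩ := pv_ofChars_digit c (h c (by simp))
      have h2 := (ih (ss + ((PySem.Int.ofChars? [c]).getD 0) ^ 2)).2 (fun x hx => h x (by simp [hx]))
      have hterm : ((PySem.Int.ofChars? [c]).getD 0) ^ 2 ≤ 81 := by
        rw [hv]
        simp only [Option.getD_some]
        have : (v : Int) ≤ 9 := by exact_mod_cast hv9
        nlinarith [Int.natCast_nonneg v]
      calc _ ≤ ss + ((PySem.Int.ofChars? [c]).getD 0) ^ 2 + 81 * rest.length := h2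
        _ ≤ ss + 81 * (rest.length + 1) := by omega

lemma pv_square_sum_nonneg (n : Int) : 0 ≤ square_sum n := (pv_sq_aux _ 0).1

lemma pv_square_sum_le (n : Int) (e : Nat) (he : 0 < e) (h0 : 0 ≤ n)
    (h : n < (10 : Int) ^ e) : square_sum n ≤ 81 * e := by
  have hd := pv_toChars_digits n h0
  have hl := pv_toChars_len n e he h0 h
  have hb := (pv_sq_aux (PySem.Int.toChars n) 0).2 hd
  unfold square_sum
  calc _ ≤ 0 + 81 * ((PySem.Int.toChars n).length : Int) := hb
    _ ≤ 81 * (e : Int) := by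
        have : ((PySem.Int.toChars n).length : Int) ≤ (e : Int) := by exact_mod_cast hl
        omega

-- both loops reject 0 (square_sum 0 = 0 loops forever; A runs out of fuel, B revisits 0)
lemma pv_sq_zero : square_sum 0 = 0 := by decide

lemma pv_loopA_zero : ∀ f : Nat, ishappyLoopA f 0 = false := by
  intro f
  induction f with
  | zero => rfl
  | succ f ih => rw [ishappyLoopA]; simpa [pv_sq_zero] using ih

lemma pv_loopB_zero : ∀ (f : Nat) (s : PySem.Set Int), ishappyLoopB (f + 2) s 0 = false := by
  intro f s
  rw [ishappyLoopB]
  by_cases h : (0:Int) ∈ s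
  · simp [h]
  · rw [pv_sq_zero, ishappyLoopB]
    simp [h]

-- peeling one step of each loop
lemma pv_loopA_peel (f : Nat) (m : Int) : ishappyLoopA (f + 1) m =
    (if square_sum m ∈ ([89, 145, 42, 37, 58, 20, 4, 16] : List Int) then false
     else if square_sum m = 1 then true
     else ishappyLoopA f (square_sum m)) := by
  rw [ishappyLoopA]

lemma pv_loopB_peel (f : Nat) (n : Int) (hn : n ≠ 1) :
    ishappyLoopB (f + 1) PySem.Set.empty n = ishappyLoopB f [n] (square_sum n) := by
  rw [ishappyLoopB]
  simp [hn]

-- seen-set elements that can never be revisited do not change ishappyLoopB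
-- (all iterates of a start ≤ B ≤ 999 stay ≤ B, since square_sum is ≤ 243 below 1000)
lemma pv_loopB_congr :
    ∀ (f : Nat) (s₁ s₂ : PySem.Set Int) (B n : Int), 243 ≤ B → B ≤ 999 →
      (∀ x : Int, 0 ≤ x → x ≤ B → (x ∈ s₁ ↔ x ∈ s₂)) → 0 ≤ n → n ≤ B →
      ishappyLoopB f s₁ n = ishappyLoopB f s₂ n := by
  intro f
  induction f with
  | zero => intros; rfl
  | succ f ih =>
    intro s₁ s₂ B n hB1 hB2 hs h0 h1
    rw [ishappyLoopB, ishappyLoopB]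
    by_cases h2 : n = 1
    · simp [h2]
    · by_cases hm : n ∈ s₁
      · have hm2 : n ∈ s₂ := (hs n h0 h1).mp hm
        simp [h2, hm, hm2]
      · have hm2 : n ∉ s₂ := fun hh => hm ((hs n h0 h1).mpr hh)
        rw [if_neg h2, if_neg h2,
            show PySem.Set.contains s₁ n = false from by simp [hm],
            show PySem.Set.contains s₂ n = false from by simp [hm2]]
        simp only [Bool.false_eq_true, if_false]
        apply ih _ _ B
        · exact hB1
        · exact hB2
        · intro x hx0 hx1
          rw [PySem.Set.mem_add, PySem.Set.mem_add]
          exact or_congr (hs x hx0 hx1) Iff.rfl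
        · exact pv_square_sum_nonneg n
        · have := pv_square_sum_le n 3 (by norm_num) h0 (by norm_num; omega)
          omega

-- the kernel checks the two happiness tests agree on all loop entry points 1..243
set_option maxRecDepth 100000 in
set_option maxHeartbeats 12000000 in
lemma pv_CS : ∀ k : Nat, k < 243 → ishappy ((k : Int) + 1) = ishappy_alt ((k : Int) + 1) := by
  decide

set_option maxRecDepth 100000 in
set_option maxHeartbeats 12000000 in
lemma pv_CM : ∀ k : Nat, k < 243 →
    ishappyLoopA 1000 ((k : Int) + 1) = ishappyLoopB 999 PySem.Set.empty ((k : Int) + 1) := by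
  decide

set_option maxRecDepth 100000 in
set_option maxHeartbeats 12000000 in
lemma pv_CE : ∀ k : Nat, k < 243 →
    pvCheckA ((k : Int) + 1) = ishappyLoopB 998 PySem.Set.empty ((k : Int) + 1) := by
  decide

-- Int wrappers of the three kernel checks (0 is handled by the zero lemmas)
lemma pv_CM' (m : Int) (h0 : 0 ≤ m) (h1 : m ≤ 243) :
    ishappyLoopA 1000 m = ishappyLoopB 999 PySem.Set.empty m := by
  rcases eq_or_lt_of_le h0 with h | h
  · rw [← h, pv_loopA_zero, show (999 : Nat) = 997 + 2 from rfl, pv_loopB_zero]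
  · have hk : (((m - 1).toNat : Int) + 1) = m := by omega
    rw [← hk]
    exact pv_CM (m - 1).toNat (by omega)

lemma pv_CE' (s : Int) (h0 : 0 ≤ s) (h1 : s ≤ 243) :
    pvCheckA s = ishappyLoopB 998 PySem.Set.empty s := by
  rcases eq_or_lt_of_le h0 with h | h
  · rw [← h, show pvCheckA 0 = ishappyLoopA 999 0 from by simp [pvCheckA],
      pv_loopA_zero, show (998 : Nat) = 996 + 2 from rfl, pv_loopB_zero]
  · have hk : (((s - 1).toNat : Int) + 1) = s := by omega
    rw [← hk]
    exact pv_CE (s - 1).toNat (by omega)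

lemma pv_CS' (j : Int) (h0 : 1 ≤ j) (h1 : j ≤ 243) : ishappy j = ishappy_alt j := by
  have hk : (((j - 1).toNat : Int) + 1) = j := by omega
  rw [← hk]
  exact pv_CS (j - 1).toNat (by omega)

lemma pv_seen_one (y B : Int) (hy : B < y) :
    ∀ x : Int, 0 ≤ x → x ≤ B → (x ∈ ([y] : PySem.Set Int) ↔ x ∈ (PySem.Set.empty : PySem.Set Int)) := by
  intro x hx0 hx1
  constructor
  · intro h; rcases List.mem_singleton.mp h with rfl; omega
  · intro h; exact absurd h (by simp [PySem.Set.empty])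

-- the central fact: the two happiness tests agree on every value < 10^10
lemma pv_ishappy_eq_val (j : Int) (h0 : 0 ≤ j) (hj : j < (10 : Int) ^ 10) :
    ishappy j = ishappy_alt j := by
  rcases eq_or_lt_of_le h0 with h | h
  · rw [← h]
    rw [show ishappy 0 = ishappyLoopA 1000 (square_sum 0) from rfl, pv_sq_zero, pv_loopA_zero,
        show ishappy_alt 0 = ishappyLoopB (998 + 2) PySem.Set.empty 0 from rfl, pv_loopB_zero]
  · have h1 : 1 ≤ j := h
    by_cases hc1 : j ≤ 243
    · exact pv_CS' j h1 hc1
    · -- j ≥ 244 : peel B once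
      have hne : j ≠ 1 := by omega
      have hBpeel : ishappy_alt j = ishappyLoopB 999 [j] (square_sum j) := by
        rw [show ishappy_alt j = ishappyLoopB (999 + 1) PySem.Set.empty j from rfl,
            pv_loopB_peel 999 j hne]
      by_cases hc2 : j ≤ 810
      · -- 244 ≤ j ≤ 810 : square_sum j ≤ 243
        have hm0 := pv_square_sum_nonneg j
        have hm1 : square_sum j ≤ 243 := by
          have := pv_square_sum_le j 3 (by norm_num) (by omega) (by norm_num; omega)
          omega
        rw [hBpeel, pv_loopB_congr 999 [j] PySem.Set.empty 243 (square_sum j) (by omega) (by omega)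
              (pv_seen_one j 243 (by omega)) hm0 hm1]
        exact pv_CM' (square_sum j) hm0 hm1
      · -- j ≥ 811
        have hm0 := pv_square_sum_nonneg j
        have hm1 : square_sum j ≤ 810 := by
          have := pv_square_sum_le j 10 (by norm_num) (by omega) (by norm_num; omega)
          omega
        rw [hBpeel, pv_loopB_congr 999 [j] PySem.Set.empty 810 (square_sum j) (by omega) (by omega)
              (pv_seen_one j 810 (by omega)) hm0 hm1]
        by_cases hm2 : square_sum j ≤ 243
        · exact pv_CM' (square_sum j) hm0 hm2
        · -- 244 ≤ square_sum j ≤ 810 : peel both once more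
          set m := square_sum j with hmdef
          have hmne : m ≠ 1 := by omega
          have hs0 := pv_square_sum_nonneg m
          have hs1 : square_sum m ≤ 243 := by
            have := pv_square_sum_le m 3 (by norm_num) (by omega) (by norm_num; omega)
            omega
          rw [show ishappy j = ishappyLoopA (999 + 1) m from rfl, pv_loopA_peel 999 m,
              show (999 : Nat) = 998 + 1 from rfl, pv_loopB_peel 998 m hmne,
              pv_loopB_congr 998 [m] PySem.Set.empty 243 (square_sum m) (by omega) (by omega)
                (pv_seen_one m 243 (by omega)) hs0 hs1,
              ← pv_CE' (square_sum m) hs0 hs1]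
          simp [pvCheckA]

lemma pv_sortedNum_bounds (i : Int) (h1 : 1 ≤ i) (h2 : i ≤ 2147483648) :
    0 ≤ pvSortedNum i ∧ pvSortedNum i < (10 : Int) ^ 10 := by
  have hd : ∀ c ∈ PySem.List.sorted (PySem.Int.toChars i) (fun d => d) false, c.isDigit = true := by
    intro c hc
    exact pv_toChars_digits i (by omega) c ((PySem.List.mem_sorted _ _ _ _).mp hc)
  refine ⟨pv_parseDigits_nonneg _ hd, ?_⟩
  have hlen : (PySem.List.sorted (PySem.Int.toChars i) (fun d => d) false).length ≤ 10 := by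
    rw [PySem.List.length_sorted]
    exact pv_toChars_len i 10 (by norm_num) (by omega) (by norm_num; omega)
  calc pvParseDigits _ < (10 : Int) ^ (PySem.List.sorted (PySem.Int.toChars i) (fun d => d) false).length :=
        pv_parseDigits_lt _ hd
    _ ≤ (10 : Int) ^ 10 := pow_le_pow_right₀ (by norm_num) hlen

lemma pv_fold_rel (xs : List Int)
    (hx : ∀ i ∈ xs, ishappy (pvSortedNum i) = ishappy_alt (pvSortedNum i)) :
    ∀ (l : List Int) (c : Int), c = (l.length : Int) →
      (xs.foldl stepA (l, c)).1 = xs.foldl stepB l ∧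
      (xs.foldl stepA (l, c)).2 = ((xs.foldl stepB l).length : Int) := by
  induction xs with
  | nil => intro l c hc; simpa using hc
  | cons i rest ih =>
    intro l c hc
    simp only [List.foldl_cons]
    have hrel : stepA (l, c) i = (stepB l i, ((stepB l i).length : Int)) := by
      have hhi := hx i (by simp)
      unfold stepA stepB
      by_cases hmem : pvSortedNum i ∈ l
      · simp [hmem, hc]
      · by_cases hh : ishappy (pvSortedNum i)
        · simp [hmem, hh, ← hhi, hc]
        · simp [hmem, hh, ← hhi, hc]
    rw [hrel]
    exact ih (fun x hxx => hx x (by simp [hxx])) _ _ rfl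

-- ===== VERDICT (by name: the statement is the Claim_ definition above) =====
theorem get_dist_happy_spec : Claim_equal_get_dist_happy := by
  intro r hdom
  unfold Spec_get_dist_happy get_dist_happy get_dist_happy_alt
  have hr : r ≤ 2147483648 := by
    simp [Dom_get_dist_happy, pvDomInt] at hdom; omega
  have hx : ∀ i ∈ PySem.List.pyRange 1 (r + 1) 1,
      ishappy (pvSortedNum i) = ishappy_alt (pvSortedNum i) := by
    intro i hi
    rw [PySem.List.mem_pyRange_one] at hi
    obtain ⟨hb0, hb1⟩ := pv_sortedNum_bounds i hi.1 (by omega)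
    exact pv_ishappy_eq_val _ hb0 hb1
  have h := pv_fold_rel _ hx [] 0 (by simp)
  simp only [PySem.List.len_eq]
  exact Prod.ext h.2 h.1
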